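-- pv_equiv track=rewrite | github.com/AstroLis/test-maker | tree_bool_tm.py | Filter3Forms
-- ===== SOURCE A (Python) =====
-- def CalcNFromForms123(forms123):
--  r=0
--  for i in forms123:
--   r=r|i[0]
--  return r
--
-- def Filter3Forms(forms123,N):
--   rez=forms123
--   for f in forms123:
--    if(f[1]==3):
--     ff=[f3 for f3 in forms123 if not f3==f]
--     if CalcNFromForms123(ff)==N:
--      rez=Filter3Forms(ff,N)
--   return rez
-- ===== SOURCE B (Python) =====
-- def Filter3Forms(forms123, N):
--     # Iterative: A's forward loop with overwriting makes only the LAST eligible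
--     # form-3 entry matter, so scan from the end, take the first eligible removal,
--     # and repeat until none applies.
--     rez = forms123
--     while True:
--         nxt = None
--         for f in reversed(rez):
--             if f[1] == 3:
--                 ff = [g for g in rez if g != f]
--                 r = 0
--                 for g in ff:
--                     r |= g[0]
--                 if r == N:
--                     nxt = ff
--                     break
--         if nxt is None:
--             return rez
--         rez = nxt
-- ===== Notes on version B (the rewrite author's own statement) =====
-- stated objective: alternative
-- what changed: Replaces A's recursion-inside-a-forward-loop (which launches a full recursive call for every eligible entry and discards all but the last) with an iterative loop that scans backwards for the single last eligible form-3 entry, removes its copies, and repeats; it trades recursion for iteration and avoids the discarded recursive calls.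
import Mathlib
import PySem

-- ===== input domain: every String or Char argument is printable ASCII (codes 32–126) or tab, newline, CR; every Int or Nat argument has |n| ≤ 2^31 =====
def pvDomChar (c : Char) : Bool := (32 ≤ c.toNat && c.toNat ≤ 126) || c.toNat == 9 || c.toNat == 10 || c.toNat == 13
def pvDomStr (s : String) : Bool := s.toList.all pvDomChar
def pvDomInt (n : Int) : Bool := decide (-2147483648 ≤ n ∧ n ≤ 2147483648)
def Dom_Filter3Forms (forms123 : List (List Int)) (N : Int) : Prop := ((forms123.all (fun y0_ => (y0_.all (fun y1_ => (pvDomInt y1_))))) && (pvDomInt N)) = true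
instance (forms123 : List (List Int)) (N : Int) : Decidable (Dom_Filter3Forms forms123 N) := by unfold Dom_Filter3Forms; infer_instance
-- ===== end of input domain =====

-- B replaces A's recursion-inside-a-forward-loop by an iterative backward scan that
-- removes one eligible form-3 entry per round and repeats (alternative decomposition;
-- no discarded recursive calls). Equivalence proved on lists whose rows all
-- have length ≥ 2 (elsewhere Python A raises IndexError).


-- ===== PORT A =====
-- CalcNFromForms123: r = 0; for i in forms123: r = r | i[0]
def pvCalcN (forms123 : List (List Int)) : Int :=
  forms123.foldl (fun r i => PySem.Int.bor r ((PySem.List.pyGet? i 0).getD 0)) 0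

-- used only for termination of the ports (removing a present element shortens the list)
theorem pvFilterNeLt (orig : List (List Int)) (f : List Int) (hf : f ∈ orig) :
    (orig.filter (fun g => !(g == f))).length < orig.length := by
  refine List.length_filter_lt_length_iff_exists.mpr ⟨f, hf, by simp⟩

mutual
-- the body of A: rez := forms123; for f in forms123: …; the proof argument h only
-- records that every pending f comes from the original list (for termination)
def pvLoopA (orig : List (List Int)) (N : Int) :
    (pending : List (List Int)) → (rez : List (List Int)) →
    (∀ f ∈ pending, f ∈ orig) → List (List Int)
  | [], rez, _ => rez
  | f :: rest, rez, h =>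
    if (PySem.List.pyGet? f 1).getD 0 == 3 then
      let ff := orig.filter (fun g => !(g == f))
      if pvCalcN ff == N then
        pvLoopA orig N rest (Filter3Forms ff N) (fun x hx => h x (List.mem_cons_of_mem _ hx))
      else
        pvLoopA orig N rest rez (fun x hx => h x (List.mem_cons_of_mem _ hx))
    else
      pvLoopA orig N rest rez (fun x hx => h x (List.mem_cons_of_mem _ hx))
termination_by pending _ _ => (orig.length, pending.length)
decreasing_by
  · refine Prod.Lex.left _ _ ?_
    have hlt := pvFilterNeLt orig f (h f List.mem_cons_self)
    simp only [List.unattach_filter, List.unattach_attach]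
    exact hlt
  · exact Prod.Lex.right _ (Nat.lt_succ_self _)
  · exact Prod.Lex.right _ (Nat.lt_succ_self _)
  · exact Prod.Lex.right _ (Nat.lt_succ_self _)

def Filter3Forms (forms123 : List (List Int)) (N : Int) : List (List Int) :=
  pvLoopA forms123 N forms123 forms123 (fun _ h => h)
termination_by (forms123.length, forms123.length + 1)
decreasing_by
  exact Prod.Lex.right _ (Nat.lt_succ_self _)
end

-- ===== PORT B =====
-- r = 0; for g in l: r |= g[0]   (written as an accumulator recursion)
def pvOrAll (acc : Int) : List (List Int) → Int
  | [] => acc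
  | g :: rest => pvOrAll (PySem.Int.bor acc ((PySem.List.pyGet? g 0).getD 0)) rest

-- the inner backward scan of B: first eligible f in the scan list, returning the
-- filtered list, or none
def pvFind (rez : List (List Int)) (N : Int) : List (List Int) → Option (List (List Int))
  | [] => none
  | f :: rest =>
    if (PySem.List.pyGet? f 1).getD 0 == 3 then
      let ff := rez.filter (fun g => !(g == f))
      if pvOrAll 0 ff == N then some ff else pvFind rez N rest
    else pvFind rez N rest

-- used only for termination of pvLoopB
theorem pvFind_some_length (rez : List (List Int)) (N : Int) :
    ∀ l : List (List Int), (∀ f ∈ l, f ∈ rez) → ∀ ff, pvFind rez N l = some ff →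
      ff.length < rez.length := by
  intro l
  induction l with
  | nil => intro _ ff h; simp [pvFind] at h
  | cons f rest ih =>
    intro hmem ff h
    simp only [pvFind] at h
    split at h
    · split at h
      · cases h
        exact pvFilterNeLt rez f (hmem f List.mem_cons_self)
      · exact ih (fun x hx => hmem x (List.mem_cons_of_mem _ hx)) ff h
    · exact ih (fun x hx => hmem x (List.mem_cons_of_mem _ hx)) ff h

-- the outer while-loop of B
def pvLoopB (N : Int) (rez : List (List Int)) : List (List Int) :=
  match hf : pvFind rez N rez.reverse with
  | none => rez
  | some ff => pvLoopB N ff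
termination_by rez.length
decreasing_by
  exact pvFind_some_length rez N rez.reverse (fun f hf => List.mem_reverse.mp hf) ff hf

def Filter3Forms_alt (forms123 : List (List Int)) (N : Int) : List (List Int) :=
  pvLoopB N forms123

-- ===== PRECONDITION & SPEC =====
-- Pre_ excludes exactly the inputs where Python A raises IndexError: some row is
-- shorter than 2 (f[1] is read for every row; i[0] for the rest).
def Pre_Filter3Forms (forms123 : List (List Int)) (N : Int) : Prop :=
  ∀ f ∈ forms123, 2 ≤ f.length

instance (forms123 : List (List Int)) (N : Int) : Decidable (Pre_Filter3Forms forms123 N) := by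
  unfold Pre_Filter3Forms; infer_instance

def pvWitness_Filter3Forms : List (List Int) × Int := ([[1, 3], [2, 3], [3, 2]], 3)

def Spec_Filter3Forms (forms123 : List (List Int)) (N : Int) (out : List (List Int)) : Prop := out = Filter3Forms_alt forms123 N
instance (forms123 : List (List Int)) (N : Int) (out : List (List Int)) : Decidable (Spec_Filter3Forms forms123 N out) := by unfold Spec_Filter3Forms; infer_instance

-- ===== CLAIM (what is proved, stated in full; the proofs are below) =====
def Claim_equal_Filter3Forms : Prop := ∀ (forms123 : List (List Int)) (N : Int), Dom_Filter3Forms forms123 N → Pre_Filter3Forms forms123 N → Spec_Filter3Forms forms123 N (Filter3Forms forms123 N)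

-- ===== LEMMAS AND PROOFS =====

theorem pvOrAll_eq_foldl (l : List (List Int)) (acc : Int) :
    pvOrAll acc l = l.foldl (fun r i => PySem.Int.bor r ((PySem.List.pyGet? i 0).getD 0)) acc := by
  induction l generalizing acc with
  | nil => rfl
  | cons g rest ih => simp [pvOrAll, ih]

theorem pvCalcN_eq_pvOrAll (l : List (List Int)) : pvCalcN l = pvOrAll 0 l := by
  rw [pvCalcN, pvOrAll_eq_foldl]

theorem pvFind_append (rez : List (List Int)) (N : Int) (l₁ l₂ : List (List Int)) :
    pvFind rez N (l₁ ++ l₂) =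
      (match pvFind rez N l₁ with
       | some x => some x
       | none => pvFind rez N l₂) := by
  induction l₁ with
  | nil => simp [pvFind]
  | cons f rest ih =>
    simp only [List.cons_append, pvFind]
    split
    · split
      · rfl
      · exact ih
    · exact ih

theorem pvLoopA_eq (orig : List (List Int)) (N : Int) :
    ∀ (pending rez : List (List Int)) (h : ∀ f ∈ pending, f ∈ orig),
      pvLoopA orig N pending rez h =
        (match pvFind orig N pending.reverse with
         | none => rez
         | some ff => Filter3Forms ff N) := by
  intro pending
  induction pending with
  | nil => intro rez h; simp [pvLoopA, pvFind]
  | cons f rest ih =>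
    intro rez h
    have hrev : (f :: rest).reverse = rest.reverse ++ [f] := by simp
    rw [hrev, pvFind_append]
    simp only [pvLoopA]
    have hsingle : pvFind orig N [f] =
        (if (PySem.List.pyGet? f 1).getD 0 == 3 then
          (if pvOrAll 0 (orig.filter (fun g => !(g == f))) == N
            then some (orig.filter (fun g => !(g == f))) else none)
        else none) := by
      simp only [pvFind]
    split
    · next h3 =>
      split
      · next hN =>
        rw [ih _ (fun x hx => h x (List.mem_cons_of_mem _ hx))]
        cases hcase : pvFind orig N rest.reverse with
        | some x => simp
        | none =>
          simp only []
          rw [hsingle, if_pos h3, if_pos (by rwa [pvCalcN_eq_pvOrAll] at hN)]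
      · next hN =>
        rw [ih _ (fun x hx => h x (List.mem_cons_of_mem _ hx))]
        cases hcase : pvFind orig N rest.reverse with
        | some x => simp
        | none =>
          simp only []
          rw [hsingle, if_pos h3,
            if_neg (by rwa [pvCalcN_eq_pvOrAll] at hN)]
    · next h3 =>
      rw [ih _ (fun x hx => h x (List.mem_cons_of_mem _ hx))]
      cases hcase : pvFind orig N rest.reverse with
      | some x => simp
      | none =>
        simp only []
        rw [hsingle, if_neg h3]

theorem pvMain (n : Nat) : ∀ (forms : List (List Int)) (N : Int), forms.length ≤ n →
    Filter3Forms forms N = pvLoopB N forms := by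
  induction n with
  | zero =>
    intro forms N hlen
    have : forms = [] := List.eq_nil_of_length_eq_zero (Nat.le_zero.mp hlen)
    subst this
    rw [Filter3Forms, pvLoopA_eq, pvLoopB]
    simp [pvFind]
  | succ n ih =>
    intro forms N hlen
    rw [Filter3Forms, pvLoopA_eq, pvLoopB]
    cases hcase : pvFind forms N forms.reverse with
    | none => rfl
    | some ff =>
      simp only []
      have hlt : ff.length < forms.length :=
        pvFind_some_length forms N forms.reverse (fun f hf => List.mem_reverse.mp hf) ff hcase
      exact ih ff N (by omega)

-- ===== VERDICT (by name: the statement is the Claim_ definition above) =====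
theorem Filter3Forms_spec : Claim_equal_Filter3Forms := by
  intro forms123 N _ _
  unfold Spec_Filter3Forms Filter3Forms_alt
  exact pvMain forms123.length forms123 N (le_refl _)
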